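-- pv_equiv track=rewrite | github.com/JohnnyZxy/COMP9021_Ass1_test | put_your_code_here/knights_and_knaves.py | replace_and_clean
-- ===== SOURCE A (Python) =====
-- def replace_and_clean(data, change_dict):
--
--     for old_char, new_char in change_dict.items():
--         data = data.replace(old_char, new_char)
--
--
--     lines = data.split(".")
--     cleaned_lines = []
--     for line in lines:
--         cleaned_line = "".join(char for char in line if char.isalpha() or char in ['"', ' '])
--         cleaned_lines.append(cleaned_line)
--
--     return cleaned_lines
-- ===== SOURCE B (Python) =====
-- def replace_and_clean(data, change_dict):
--     for old_char, new_char in change_dict.items():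
--         data = data.replace(old_char, new_char)
--     result = []
--     buf = []
--     for char in data:
--         if char == '.':
--             result.append(''.join(buf))
--             buf = []
--         elif char.isalpha() or char in ('"', ' '):
--             buf.append(char)
--     result.append(''.join(buf))
--     return result
-- ===== Notes on version B (the rewrite author's own statement) =====
-- stated objective: alternative
-- what changed: Replaces split('.') followed by a per-segment filter/join pass with a single linear scan over the replaced string that flushes a filtered buffer at each '.' and once at the end.
import Mathlib
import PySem

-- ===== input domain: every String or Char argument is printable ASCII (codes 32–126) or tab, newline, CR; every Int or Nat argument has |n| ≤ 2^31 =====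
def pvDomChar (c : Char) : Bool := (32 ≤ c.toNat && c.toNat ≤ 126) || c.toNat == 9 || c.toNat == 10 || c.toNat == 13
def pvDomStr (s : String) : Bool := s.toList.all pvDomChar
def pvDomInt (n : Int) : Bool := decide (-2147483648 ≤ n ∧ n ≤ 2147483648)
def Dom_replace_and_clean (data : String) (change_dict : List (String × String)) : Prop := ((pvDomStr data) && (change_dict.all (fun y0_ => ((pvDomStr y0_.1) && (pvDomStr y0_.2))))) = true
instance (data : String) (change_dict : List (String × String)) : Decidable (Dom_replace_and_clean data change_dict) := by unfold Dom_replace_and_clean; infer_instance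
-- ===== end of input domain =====

-- B is a single scan (buffer flushed at each '.') instead of A's split('.') plus per-segment
-- filter/join; same cost class, a different decomposition. Equivalence is total (no Pre_ needed).

-- ===== PORT A =====
-- char.isalpha() or char in ['"', ' ']
def pvKeepA (c : Char) : Bool := PySem.Chars.isalpha c || c == '"' || c == ' '

def replace_and_clean (data : String) (change_dict : List (String × String)) : List String :=
  -- for old_char, new_char in change_dict.items(): data = data.replace(old_char, new_char)
  let data := change_dict.foldl (fun d p => PySem.Str.replace d p.1 p.2) data
  -- lines = data.split(".")   (sep "." nonempty; Chars.splitOn is exactly this split)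
  let lines := (PySem.Chars.splitOn data.toList ['.']).map String.ofList
  -- for line in lines: cleaned_lines.append("".join(char for char in line if …))
  lines.foldl (fun cleaned_lines line => cleaned_lines ++ [String.ofList (line.toList.filter pvKeepA)]) []

-- ===== PORT B =====
-- the scan loop of Source B: buf is the filtered buffer, result the flushed segments
def pvScanB : List Char → List Char → List String → List String
  | [], buf, result => result ++ [String.ofList buf]
  | c :: rest, buf, result =>
      if c = '.' then pvScanB rest [] (result ++ [String.ofList buf])
      else if (PySem.Chars.isalpha c || c == '"' || c == ' ') then pvScanB rest (buf ++ [c]) result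
      else pvScanB rest buf result

def replace_and_clean_alt (data : String) (change_dict : List (String × String)) : List String :=
  let data := change_dict.foldl (fun d p => PySem.Str.replace d p.1 p.2) data
  pvScanB data.toList [] []

-- ===== PRECONDITION & SPEC =====
def Spec_replace_and_clean (data : String) (change_dict : List (String × String)) (out : List String) : Prop := out = replace_and_clean_alt data change_dict
instance (data : String) (change_dict : List (String × String)) (out : List String) : Decidable (Spec_replace_and_clean data change_dict out) := by unfold Spec_replace_and_clean; infer_instance

-- ===== CLAIM (what is proved, stated in full; the proofs are below) =====
def Claim_equal_replace_and_clean : Prop := ∀ (data : String) (change_dict : List (String × String)), Dom_replace_and_clean data change_dict → Spec_replace_and_clean data change_dict (replace_and_clean data change_dict)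

-- ===== LEMMAS AND PROOFS =====

-- reference segmentation: Python's split('.') as a simple structural recursion
def pvSegs : List Char → List (List Char)
  | [] => [[]]
  | c :: rest =>
      if c = '.' then [] :: pvSegs rest
      else match pvSegs rest with
        | s :: ss => (c :: s) :: ss
        | [] => [[c]]

theorem pvSegs_ne_nil (cs : List Char) : pvSegs cs ≠ [] := by
  cases cs with
  | nil => simp [pvSegs]
  | cons c rest =>
    simp only [pvSegs]
    split
    · simp
    · cases h : pvSegs rest <;> simp

-- go invariant: splitOn.go with sep ['.'] computes acc.reverse ++ (cur.reverse glued onto pvSegs l)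
theorem pvGo_eq (fuel : Nat) (l cur : List Char) (acc : List (List Char))
    (hf : l.length ≤ fuel) :
    PySem.Chars.splitOn.go ['.'] fuel l cur acc =
      acc.reverse ++ (match pvSegs l with
        | s :: ss => (cur.reverse ++ s) :: ss
        | [] => []) := by
  induction fuel generalizing l cur acc with
  | zero =>
    interval_cases hl : l.length
    rw [List.length_eq_zero_iff] at hl
    subst hl
    simp [PySem.Chars.splitOn.go, pvSegs]
  | succ fuel ih =>
    cases l with
    | nil => simp [PySem.Chars.splitOn.go, pvSegs]
    | cons c rest =>
      simp only [List.length_cons, Nat.succ_le_succ_iff] at hf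
      rw [PySem.Chars.splitOn.go]
      by_cases hc : c = '.'
      · subst hc
        have hpre : List.isPrefixOf ['.'] ('.' :: rest) = true := by
          simp [List.isPrefixOf]
        simp only [hpre, if_pos, List.length_cons]
        rw [ih _ _ _ (by simpa using hf)]
        simp only [pvSegs]
        cases h : pvSegs rest with
        | nil => exact absurd h (pvSegs_ne_nil rest)
        | cons s ss =>
          simp only [List.length_nil, Nat.zero_add, List.drop_succ_cons, List.drop_zero, h]
          simp
      · have hpre : List.isPrefixOf ['.'] (c :: rest) = false := by
          simp [List.isPrefixOf]
          exact fun h => absurd h.symm hc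
        simp only [hpre, Bool.false_eq_true, if_false]
        rw [ih _ _ _ hf]
        simp only [pvSegs, if_neg hc]
        cases h : pvSegs rest with
        | nil => exact absurd h (pvSegs_ne_nil rest)
        | cons s ss => simp [h]

theorem pvSplitOn_eq_segs (cs : List Char) :
    PySem.Chars.splitOn cs ['.'] = pvSegs cs := by
  rw [PySem.Chars.splitOn, pvGo_eq cs.length.succ cs [] [] (Nat.le_succ _)]
  cases h : pvSegs cs with
  | nil => exact absurd h (pvSegs_ne_nil cs)
  | cons s ss => simp

-- B's scan computes pvSegs with the pending buffer glued onto the first segment (filtered)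
theorem pvScanB_eq (cs buf : List Char) (res : List String) :
    pvScanB cs buf res =
      res ++ (match pvSegs cs with
        | s :: ss => String.ofList (buf ++ s.filter pvKeepA) :: ss.map (fun s => String.ofList (s.filter pvKeepA))
        | [] => []) := by
  induction cs generalizing buf res with
  | nil => simp [pvScanB, pvSegs]
  | cons c rest ih =>
    simp only [pvScanB]
    by_cases hc : c = '.'
    · subst hc
      rw [if_pos rfl, ih]
      simp only [pvSegs]
      cases h : pvSegs rest with
      | nil => exact absurd h (pvSegs_ne_nil rest)
      | cons s ss => simp [h]
    · rw [if_neg hc]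
      by_cases hk : (PySem.Chars.isalpha c || c == '"' || c == ' ') = true
      · rw [if_pos hk, ih]
        simp only [pvSegs, if_neg hc]
        cases h : pvSegs rest with
        | nil => exact absurd h (pvSegs_ne_nil rest)
        | cons s ss => simp [pvKeepA, List.filter_cons, hk]
      · rw [if_neg hk, ih]
        simp only [pvSegs, if_neg hc]
        cases h : pvSegs rest with
        | nil => exact absurd h (pvSegs_ne_nil rest)
        | cons s ss => simp [pvKeepA, List.filter_cons, hk]

theorem pvFoldl_append_map {α β : Type} (f : α → β) (l : List α) (acc : List β) :
    l.foldl (fun acc x => acc ++ [f x]) acc = acc ++ l.map f := by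
  induction l generalizing acc with
  | nil => simp
  | cons x xs ih => simp [List.foldl, ih]

-- ===== VERDICT (by name: the statement is the Claim_ definition above) =====
theorem replace_and_clean_spec : Claim_equal_replace_and_clean := by
  intro data change_dict _
  unfold Spec_replace_and_clean replace_and_clean replace_and_clean_alt
  rw [pvFoldl_append_map, pvScanB_eq, pvSplitOn_eq_segs]
  cases h : pvSegs (change_dict.foldl (fun d p => PySem.Str.replace d p.1 p.2) data).toList with
  | nil => exact absurd h (pvSegs_ne_nil _)
  | cons s ss =>
    simp [List.map_map, Function.comp]
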